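-- pv_equiv track=rewrite | github.com/utkusevl/BBM103 | text_analyzer.py | find_shortest_words
-- ===== SOURCE A (Python) =====
-- def calculate_word_frequencies(words):
--     freq = {}
--     for word in words:
--         if word in freq:
--             freq[word] += 1
--         else:
--             freq[word] = 1
--     return freq
--
-- def find_shortest_words(words):
--     word_count = calculate_word_frequencies(words)
--     shortest_length = min(len(word) for word in words)
--
--     shortest_words = {}
--     for word in words:
--         if len(word) == shortest_length:
--             shortest_words[word] = word_count[word]
--
--     shortest_words = dict(sorted(shortest_words.items(), key=lambda x: (-x[1], x[0])))
--
--     return list(shortest_words.keys()), shortest_words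
-- ===== SOURCE B (Python) =====
-- def find_shortest_words(words):
--     buckets = {}
--     for word in words:
--         bucket = buckets.get(len(word), {})
--         bucket[word] = bucket.get(word, 0) + 1
--         buckets[len(word)] = bucket
--     shortest = buckets[min(buckets)]
--     result = dict(sorted(shortest.items(), key=lambda x: (-x[1], x[0])))
--     return list(result.keys()), result
-- ===== Notes on version B (the rewrite author's own statement) =====
-- stated objective: alternative
-- what changed: B builds in one pass a length-indexed table mapping each word length to its own word->count bucket and reads the answer straight from the bucket at the minimal length, instead of A's three separate passes (count every word, min over all lengths, filter pass with lookups).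
import Mathlib
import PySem

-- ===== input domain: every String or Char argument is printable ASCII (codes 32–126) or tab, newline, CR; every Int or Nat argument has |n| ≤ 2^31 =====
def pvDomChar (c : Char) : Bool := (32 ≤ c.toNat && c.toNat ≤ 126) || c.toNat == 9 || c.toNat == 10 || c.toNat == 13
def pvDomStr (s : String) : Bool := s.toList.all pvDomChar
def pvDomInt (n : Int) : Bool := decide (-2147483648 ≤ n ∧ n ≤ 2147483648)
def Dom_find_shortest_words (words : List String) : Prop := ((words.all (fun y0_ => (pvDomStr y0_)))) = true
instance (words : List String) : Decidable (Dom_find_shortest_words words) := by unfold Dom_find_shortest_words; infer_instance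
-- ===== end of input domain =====

-- B replaces A's three passes (count every word, min over all lengths, filter pass with
-- lookups) by one pass building a length-indexed table of word->count buckets and reading
-- the min-length bucket; an alternative decomposition, not claimed faster.

-- ===== PORT A =====
def calculate_word_frequencies (words : List String) : PySem.Dict String Int :=
  words.foldl
    (fun freq word =>
      if freq.contains word then freq.insert word (freq.getD word 0 + 1)
      else freq.insert word 1)
    PySem.Dict.empty

def find_shortest_words (words : List String) : List String × (List (String × Int)) :=
  let word_count := calculate_word_frequencies words
  match PySem.List.min? (words.map (fun w => (PySem.Str.len w : Int))) (fun x => x) with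
  | none => ([], [])  -- Python raises ValueError on empty words; excluded by Pre_
  | some shortest_length =>
    let shortest_words :=
      words.foldl
        (fun d word =>
          if (PySem.Str.len word : Int) = shortest_length then
            d.insert word (word_count.getD word 0)  -- word_count[word]: key always present, so getD is exact
          else d)
        PySem.Dict.empty
    let sortedItems := PySem.List.sorted2 shortest_words.items (fun x => -x.2) (fun x => x.1)
    let d := sortedItems.foldl (fun d p => d.insert p.1 p.2) PySem.Dict.empty
    (d.keys, d.items)

-- ===== PORT B =====
def find_shortest_words_alt (words : List String) : List String × (List (String × Int)) :=
  let buckets : PySem.Dict Int (PySem.Dict String Int) :=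
    words.foldl
      (fun bs word =>
        bs.modify ((PySem.Str.len word : Int)) PySem.Dict.empty
          (fun b => b.insert word (b.getD word 0 + 1)))
      PySem.Dict.empty
  match PySem.List.min? buckets.keys (fun x => x) with
  | none => ([], [])  -- Python raises ValueError on empty buckets; excluded by Pre_
  | some m =>
    let shortest := buckets.getD m PySem.Dict.empty  -- buckets[m]: m is always a key, so getD is exact
    let sortedItems := PySem.List.sorted2 shortest.items (fun x => -x.2) (fun x => x.1)
    let d := sortedItems.foldl (fun d p => d.insert p.1 p.2) PySem.Dict.empty
    (d.keys, d.items)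

-- ===== PRECONDITION & SPEC =====
-- Pre_ excludes only the empty list, on which both A and B raise ValueError (min of an empty iterable).
def Pre_find_shortest_words (words : List String) : Prop := words ≠ []
instance (words : List String) : Decidable (Pre_find_shortest_words words) := by unfold Pre_find_shortest_words; infer_instance
def pvWitness_find_shortest_words : List String := (["ab", "c", "ab", "d"])

def Spec_find_shortest_words (words : List String) (out : List String × (List (String × Int))) : Prop := out = find_shortest_words_alt words
instance (words : List String) (out : List String × (List (String × Int))) : Decidable (Spec_find_shortest_words words out) := by unfold Spec_find_shortest_words; infer_instance

-- ===== CLAIM (what is proved, stated in full; the proofs are below) =====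
def Claim_equal_find_shortest_words : Prop := ∀ (words : List String), Dom_find_shortest_words words → Pre_find_shortest_words words → Spec_find_shortest_words words (find_shortest_words words)

-- ===== LEMMAS AND PROOFS =====

-- A's counting loop is Counter(words): in its else-branch the missing key reads as 0
theorem cwf_eq (words : List String) :
    calculate_word_frequencies words = PySem.Dict.counter words := by
  unfold calculate_word_frequencies
  rw [← PySem.Dict.foldl_insert_getD_add_one_eq_counter]
  congr 1
  funext d w
  by_cases h : d.contains w = true
  · simp [h]
  · simp [h, PySem.Dict.getD_of_not_contains d 0 (by simpa using h)]

-- a conditional-insert loop is the insert loop over the filtered list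
theorem foldl_if_insert_filter (f : String → Int) (L : Int) (v : String → Int)
    (ws : List String) (d : PySem.Dict String Int) :
    ws.foldl (fun d w => if f w = L then d.insert w (v w) else d) d
      = (ws.filter (fun w => decide (f w = L))).foldl
          (fun d w => d.insert w (v w)) d := by
  induction ws generalizing d with
  | nil => rfl
  | cons x t ih =>
    simp only [List.foldl_cons, List.filter_cons]
    by_cases hx : f x = L
    · simp [hx, ih]
    · simp [hx, ih]

-- lookup after an insert loop whose value depends only on the key
theorem getD_foldl_insert_keyval (v : String → Int) (xs : List String)
    (d : PySem.Dict String Int) (k : String) :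
    (xs.foldl (fun d w => d.insert w (v w)) d).getD k 0
      = if k ∈ xs then v k else d.getD k 0 := by
  induction xs generalizing d with
  | nil => simp
  | cons x t ih =>
    simp only [List.foldl_cons, ih, List.mem_cons]
    by_cases ht : k ∈ t
    · simp [ht]
    · by_cases hk : k = x <;> simp [ht, hk, PySem.Dict.getD_insert]

-- items of an insert loop whose value depends only on the key
theorem items_foldl_insert_keyval (v : String → Int) (xs : List String) :
    ((xs.foldl (fun d w => d.insert w (v w)) PySem.Dict.empty).items)
      = (PySem.Set.ofList xs).map (fun k => (k, v k)) := by
  have hnd : ((xs.foldl (fun d w => d.insert w (v w)) PySem.Dict.empty)).keys.Nodup :=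
    PySem.Dict.nodup_keys_foldl_insert xs _ _ (by simp [PySem.Dict.empty, PySem.Dict.keys])
  have hkeys : ((xs.foldl (fun d w => d.insert w (v w)) PySem.Dict.empty)).keys
      = PySem.Set.ofList xs := by
    rw [PySem.Dict.keys_foldl_insert]
    rfl
  rw [PySem.Dict.items_eq_map_keys _ hnd 0, hkeys]
  apply List.map_congr_left
  intro k hk
  have hk' : k ∈ xs := (PySem.Set.mem_ofList xs k).mp hk
  simp [getD_foldl_insert_keyval, hk']

-- the length-L bucket of B's grouping loop is the counter loop over the length-L words
theorem bucket_getD (f : String → Int) (ws : List String)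
    (bs : PySem.Dict Int (PySem.Dict String Int)) (L : Int) :
    (ws.foldl
        (fun bs word =>
          bs.modify (f word) PySem.Dict.empty
            (fun b => b.insert word (b.getD word 0 + 1)))
        bs).getD L PySem.Dict.empty
      = ((ws.filter (fun w => decide (f w = L))).foldl
          (fun b w => b.insert w (b.getD w 0 + 1)) (bs.getD L PySem.Dict.empty)) := by
  induction ws generalizing bs with
  | nil => rfl
  | cons x t ih =>
    simp only [List.foldl_cons, List.filter_cons]
    rw [ih]
    by_cases hx : f x = L
    · simp only [hx, decide_true, if_true, List.foldl_cons]
      congr 1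
      simp [PySem.Dict.modify]
    · simp only [hx, decide_false, Bool.false_eq_true, if_false]
      congr 1
      simp only [PySem.Dict.modify, PySem.Dict.getD_insert]
      rw [if_neg (fun heq => hx heq.symm)]

-- min over the first-occurrence dedup = min over the list (Int, identity key)
theorem min?_ofList_eq (xs : List Int) (h : xs ≠ []) :
    PySem.List.min? (PySem.Set.ofList xs) (fun x => x) = PySem.List.min? xs (fun x => x) := by
  obtain ⟨mB, hB⟩ : ∃ m, PySem.List.min? xs (fun x => x) = some m := by
    cases hm : PySem.List.min? xs (fun x => x) with
    | none => exact absurd ((PySem.List.min?_eq_none_iff xs _).mp hm) h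
    | some m => exact ⟨m, rfl⟩
  have hne : PySem.Set.ofList xs ≠ [] := by
    intro he
    have := (PySem.Set.mem_ofList xs mB).mpr (PySem.List.min?_mem hB)
    simp [he] at this
  obtain ⟨mA, hA⟩ : ∃ m, PySem.List.min? (PySem.Set.ofList xs) (fun x => x) = some m := by
    cases hm : PySem.List.min? (PySem.Set.ofList xs) (fun x => x) with
    | none => exact absurd ((PySem.List.min?_eq_none_iff _ _).mp hm) hne
    | some m => exact ⟨m, rfl⟩
  rw [hA, hB]
  have h1 : mB ≤ mA := PySem.List.min?_isMin hB _ ((PySem.Set.mem_ofList xs mA).mp (PySem.List.min?_mem hA))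
  have h2 : mA ≤ mB := PySem.List.min?_isMin hA _ ((PySem.Set.mem_ofList xs mB).mpr (PySem.List.min?_mem hB))
  exact congrArg some (le_antisymm h2 h1)

theorem main_eq (words : List String) (hpre : words ≠ []) :
    find_shortest_words words = find_shortest_words_alt words := by
  unfold find_shortest_words find_shortest_words_alt
  dsimp only
  rw [cwf_eq]
  have hkeys : (words.foldl
      (fun bs word =>
        bs.modify ((PySem.Str.len word : Int)) PySem.Dict.empty
          (fun b => b.insert word (b.getD word 0 + 1)))
      (PySem.Dict.empty : PySem.Dict Int (PySem.Dict String Int))).keys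
      = PySem.Set.ofList (words.map (fun w => (PySem.Str.len w : Int))) := by
    rw [PySem.Dict.keys_foldl_modify_key]
    rfl
  have hmapne : words.map (fun w => (PySem.Str.len w : Int)) ≠ [] := by
    simpa using hpre
  rw [hkeys, min?_ofList_eq _ hmapne]
  cases hmin : PySem.List.min? (words.map (fun w => (PySem.Str.len w : Int))) (fun x => x) with
  | none => exact absurd ((PySem.List.min?_eq_none_iff _ _).mp hmin) hmapne
  | some L =>
    have hitems :
        (words.foldl
          (fun d word =>
            if (PySem.Str.len word : Int) = L then
              d.insert word ((PySem.Dict.counter words).getD word 0)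
            else d)
          PySem.Dict.empty).items
        = ((words.foldl
            (fun bs word =>
              bs.modify ((PySem.Str.len word : Int)) PySem.Dict.empty
                (fun b => b.insert word (b.getD word 0 + 1)))
            (PySem.Dict.empty : PySem.Dict Int (PySem.Dict String Int))).getD L PySem.Dict.empty).items := by
      rw [foldl_if_insert_filter (fun w => (PySem.Str.len w : Int)) L, items_foldl_insert_keyval]
      rw [bucket_getD]
      have hstart : (PySem.Dict.empty : PySem.Dict Int (PySem.Dict String Int)).getD L PySem.Dict.empty
          = PySem.Dict.empty := by
        simp [PySem.Dict.getD, PySem.Dict.get?, PySem.Dict.empty]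
      rw [hstart, PySem.Dict.foldl_insert_getD_add_one_eq_counter, PySem.Dict.items_counter]
      apply List.map_congr_left
      intro k hk
      have hk' := (PySem.Set.mem_ofList _ k).mp hk
      rw [List.mem_filter] at hk'
      have hcf : List.count k (List.filter (fun w => decide (PySem.Str.len w = L)) words)
          = List.count k words := List.count_filter hk'.2
      rw [PySem.Dict.getD_counter, hcf]
    simp only [hitems]

-- ===== VERDICT (by name: the statement is the Claim_ definition above) =====
theorem find_shortest_words_spec : Claim_equal_find_shortest_words := by
  intro words _ hpre
  unfold Pre_find_shortest_words at hpre
  unfold Spec_find_shortest_words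
  exact main_eq words hpre
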